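-- pv_equiv track=rewrite | github.com/1sjh68/DeepResearch | core/patch_manager.py | _safe_literal_replace
-- ===== SOURCE A (Python) =====
-- def _safe_literal_replace(text: str, needle: str, replacement: str, max_replacements: int) -> tuple[str, int]:
--     if not needle:
--         return text, 0
--
--     limit = max_replacements if max_replacements > 0 else 1
--     pieces: list[str] = []
--     start = 0
--     replaced = 0
--
--     while True:
--         idx = text.find(needle, start)
--         if idx == -1 or replaced >= limit:
--             pieces.append(text[start:])
--             break
--         pieces.append(text[start:idx])
--         pieces.append(replacement)
--         replaced += 1
--         start = idx + len(needle)
--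
--     return "".join(pieces), replaced
-- ===== SOURCE B (Python) =====
-- def _safe_literal_replace(text: str, needle: str, replacement: str, max_replacements: int) -> tuple[str, int]:
--     if not needle:
--         return text, 0
--     limit = max_replacements if max_replacements > 0 else 1
--     parts = text.split(needle, limit)
--     return replacement.join(parts), len(parts) - 1
-- ===== Notes on version B (the rewrite author's own statement) =====
-- stated objective: simpler
-- what changed: Replaces A's manual find/slice/accumulate while-loop (explicit start index, pieces list, counter) by a count-free split/join decomposition: text.split(needle, limit) followed by replacement.join, with the count read off as len(parts) - 1.
import Mathlib
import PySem

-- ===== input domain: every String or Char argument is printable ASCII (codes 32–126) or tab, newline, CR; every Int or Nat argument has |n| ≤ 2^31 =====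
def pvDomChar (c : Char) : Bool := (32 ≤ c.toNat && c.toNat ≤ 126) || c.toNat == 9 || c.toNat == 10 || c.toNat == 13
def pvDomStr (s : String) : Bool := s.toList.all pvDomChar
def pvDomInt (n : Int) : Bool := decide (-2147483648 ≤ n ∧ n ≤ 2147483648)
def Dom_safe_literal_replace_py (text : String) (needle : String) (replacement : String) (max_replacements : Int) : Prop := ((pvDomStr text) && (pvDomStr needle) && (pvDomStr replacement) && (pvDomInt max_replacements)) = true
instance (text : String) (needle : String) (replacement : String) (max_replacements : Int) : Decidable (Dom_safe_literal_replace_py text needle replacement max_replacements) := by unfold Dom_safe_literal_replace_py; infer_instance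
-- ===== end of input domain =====

-- B replaces A's find/accumulate while-loop by a split(needle, limit)/join decomposition (simpler; return value only, no mutation).

-- ===== PORT A =====
-- termination fact for the while-loop port (cited by decreasing_by)
theorem pvFindFrom_bounds (s sub : List Char) (k : Nat)
    (h : PySem.Chars.findFrom s sub (k : Int) ≠ -1) :
    k ≤ s.length ∧ (k : Int) ≤ PySem.Chars.findFrom s sub (k : Int) ∧
      (PySem.Chars.findFrom s sub (k : Int)).toNat + sub.length ≤ s.length := by
  have hk : k ≤ s.length := by
    by_contra hk
    apply h
    simp only [PySem.Chars.findFrom]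
    have h1 : (s.length : Int) < (k : Int) := by omega
    simp [h1, show ¬ ((k : Int) < 0) by omega]
  obtain ⟨h1, h2, _⟩ := PySem.Chars.findFrom_natCast_spec s sub k hk h
  have he := PySem.Chars.findFrom_natCast s sub k hk
  have hfl := PySem.Chars.find_le_length (List.drop k s) sub
  have hlen := h2.length_le
  simp only [List.length_drop] at hlen hfl
  rw [he] at h1 h2 hlen ⊢
  split at h1
  · simp_all
  · constructor
    · omega
    · omega

-- the Python while-loop: state (start, pieces, replaced); returns (pieces, replaced)
def pvALoop (text needle replacement : String) (hne : needle ≠ "") (limit : Int)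
    (start : Nat) (pieces : List String) (replaced : Int) : List String × Int :=
  let idx := PySem.Str.findFrom text needle (start : Int)
  if idx = -1 ∨ replaced ≥ limit then
    (pieces ++ [PySem.Str.slice text (some (start : Int)) none], replaced)
  else
    pvALoop text needle replacement hne limit (idx.toNat + needle.toList.length)
      (pieces ++ [PySem.Str.slice text (some (start : Int)) (some idx), replacement]) (replaced + 1)
termination_by text.toList.length + 1 - start
decreasing_by
  rename_i h
  rw [not_or] at h
  have hff : PySem.Chars.findFrom text.toList needle.toList (start : Int) ≠ -1 := by
    simpa [PySem.Str.findFrom_eq] using h.1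
  obtain ⟨hk, h1, h2⟩ := pvFindFrom_bounds text.toList needle.toList start hff
  have hn : needle.toList ≠ [] := by
    intro hcon; exact hne (by simpa [String.toList_eq_nil_iff] using hcon)
  have hn1 : 1 ≤ needle.toList.length := by
    cases hnl : needle.toList with
    | nil => exact absurd hnl hn
    | cons a t => simp [hnl]
  simp only [PySem.Str.findFrom_eq] at *
  omega

def safe_literal_replace_py (text : String) (needle : String) (replacement : String) (max_replacements : Int) : String × Int :=
  if h : needle = "" then (text, 0)
  else
    let limit := if max_replacements > 0 then max_replacements else 1
    let r := pvALoop text needle replacement h limit 0 [] 0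
    (PySem.Str.join "" r.1, r.2)

-- ===== PORT B =====
def safe_literal_replace_py_alt (text : String) (needle : String) (replacement : String) (max_replacements : Int) : String × Int :=
  if needle = "" then (text, 0)
  else
    let limit := if max_replacements > 0 then max_replacements else 1
    match PySem.Str.splitMax? text needle limit with
    | none => (text, 0)  -- totality guard only: splitMax? is none only for needle = "", excluded above
    | some parts => (PySem.Str.join replacement parts, (parts.length : Int) - 1)

-- ===== PRECONDITION & SPEC =====
def Spec_safe_literal_replace_py (text : String) (needle : String) (replacement : String) (max_replacements : Int) (out : String × Int) : Prop := out = safe_literal_replace_py_alt text needle replacement max_replacements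
instance (text : String) (needle : String) (replacement : String) (max_replacements : Int) (out : String × Int) : Decidable (Spec_safe_literal_replace_py text needle replacement max_replacements out) := by unfold Spec_safe_literal_replace_py; infer_instance

-- ===== CLAIM (what is proved, stated in full; the proofs are below) =====
def Claim_equal_safe_literal_replace_py : Prop := ∀ (text : String) (needle : String) (replacement : String) (max_replacements : Int), Dom_safe_literal_replace_py text needle replacement max_replacements → Spec_safe_literal_replace_py text needle replacement max_replacements (safe_literal_replace_py text needle replacement max_replacements)

-- ===== LEMMAS AND PROOFS =====

-- reference splitter: at most m splits, each at the first occurrence of sep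
def pvSplit (sep : List Char) : Nat → List Char → List (List Char)
  | 0, s => [s]
  | m+1, s =>
    if PySem.Chars.find s sep = -1 then [s]
    else s.take (PySem.Chars.find s sep).toNat ::
      pvSplit sep m (s.drop ((PySem.Chars.find s sep).toNat + sep.length))

-- prepend onto the head piece
def pvHd (pre : List Char) : List (List Char) → List (List Char)
  | [] => []
  | p :: t => (pre ++ p) :: t

-- interleave the replacement between pieces
def pvInter (r : List Char) : List (List Char) → List (List Char)
  | [] => []
  | [p] => [p]
  | p :: q :: t => p :: r :: pvInter r (q :: t)

theorem pvSplit_ne_nil (sep : List Char) (m : Nat) (s : List Char) : pvSplit sep m s ≠ [] := by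
  cases m <;> simp [pvSplit] <;> split <;> simp

theorem pvFindGo (sub : List Char) : ∀ (l : List Char) (k : Nat),
    PySem.Chars.find.go sub l k =
      if PySem.Chars.find l sub = -1 then -1 else (k : Int) + PySem.Chars.find l sub := by
  intro l
  induction l with
  | nil =>
    intro k
    simp only [PySem.Chars.find, PySem.Chars.find.go]
    split <;> simp_all
  | cons c t ih =>
    intro k
    simp only [PySem.Chars.find, PySem.Chars.find.go]
    split
    · simp
    · rw [ih (k+1), ih 1]
      have := PySem.Chars.neg_one_le_find t sub
      split <;> simp <;> omega

theorem pvFind_nil_of_ne (sub : List Char) (hs : sub ≠ []) : PySem.Chars.find [] sub = -1 := by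
  simp [PySem.Chars.find, PySem.Chars.find.go, hs]

theorem pvGoSpec (sep : List Char) (hs : sep ≠ []) :
    ∀ (fuel : Nat) (l : List Char) (m : Nat) (cur : List Char) (acc : List (List Char)),
      l.length < fuel →
      PySem.Chars.splitOnMax.go sep fuel m l cur acc
        = acc.reverse ++ pvHd cur.reverse (pvSplit sep m l) := by
  intro fuel
  induction fuel with
  | zero => intro l m cur acc h; omega
  | succ f ih =>
    intro l m cur acc h
    cases l with
    | nil =>
      rw [PySem.Chars.splitOnMax.go]
      · cases m with
        | zero => simp [pvSplit, pvHd]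
        | succ m' => simp [pvSplit, pvFind_nil_of_ne sep hs, pvHd]
      · omega
    | cons c rest =>
      rw [PySem.Chars.splitOnMax.go]
      by_cases hm : m = 0
      · subst hm; simp [pvSplit, pvHd]
      · obtain ⟨m', rfl⟩ : ∃ m', m = m' + 1 := ⟨m - 1, by omega⟩
        simp only [hm, if_false]
        by_cases hp : sep.isPrefixOf (c :: rest) = true
        · -- split here: find = 0
          have hfind : PySem.Chars.find (c :: rest) sep = 0 := by
            simp [PySem.Chars.find, PySem.Chars.find.go, hp]
          have hsl : 1 ≤ sep.length := by cases sep with | nil => simp_all | cons a t => simp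
          have hd : (List.drop sep.length (c :: rest)).length < f := by
            simp only [List.length_drop, List.length_cons] at h ⊢
            omega
          rw [if_pos hp, ih _ _ _ _ hd]
          rcases hps : pvSplit sep m' (List.drop sep.length (c :: rest)) with _ | ⟨p, t⟩
          · exact absurd hps (pvSplit_ne_nil _ _ _)
          · simp [pvSplit, hfind, pvHd, hps]
        · -- no split at this position
          have hfind : PySem.Chars.find (c :: rest) sep =
              if PySem.Chars.find rest sep = -1 then -1 else 1 + PySem.Chars.find rest sep := by
            simp only [PySem.Chars.find, PySem.Chars.find.go, hp, if_false]
            exact pvFindGo sep rest 1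
          rw [if_neg hp, ih _ _ _ _ (by simp only [List.length_cons] at h; omega)]
          by_cases hr : PySem.Chars.find rest sep = -1
          · simp [pvSplit, hfind, hr, pvHd]
          · have hge : 0 ≤ PySem.Chars.find rest sep := by
              have := PySem.Chars.neg_one_le_find rest sep; omega
            have hT : (1 + PySem.Chars.find rest sep).toNat
                = 1 + (PySem.Chars.find rest sep).toNat := by omega
            have hne1 : ¬ (1 + PySem.Chars.find rest sep = -1) := by omega
            simp only [pvSplit, hfind, hr, if_false, hne1, hT]
            rcases hps : pvSplit sep m' (List.drop ((PySem.Chars.find rest sep).toNat + sep.length) rest) with _ | ⟨p, t⟩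
            · exact absurd hps (pvSplit_ne_nil _ _ _)
            · simp only [pvHd, hps]
              rw [Nat.add_comm 1 ((PySem.Chars.find rest sep).toNat), List.take_succ_cons,
                show (PySem.Chars.find rest sep).toNat + 1 + sep.length
                    = ((PySem.Chars.find rest sep).toNat + sep.length) + 1 by omega,
                List.drop_succ_cons, hps]
              simp

theorem pvJoinInter (r : List Char) : ∀ (ps : List (List Char)),
    PySem.Chars.join [] (pvInter r ps) = PySem.Chars.join r ps := by
  intro ps
  induction ps with
  | nil => rfl
  | cons p t ih =>
    cases t with
    | nil => simp [pvInter, PySem.Chars.join_singleton]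
    | cons q u =>
      rcases hu : pvInter r (q :: u) with _ | ⟨x, y⟩
      · rcases u with _ | ⟨a, b⟩ <;> simp [pvInter] at hu
      · rw [show pvInter r (p :: q :: u) = p :: r :: pvInter r (q :: u) from rfl, hu,
          PySem.Chars.join_cons_cons, PySem.Chars.join_cons_cons, ← hu, ih]
        simp [PySem.Chars.join_cons_cons]

theorem pvALoop_spec (text needle replacement : String) (hne : needle ≠ "") (limit : Int) :
    ∀ (budget : Nat) (start : Nat) (pieces : List String) (replaced : Int),
      start ≤ text.toList.length → budget = (limit - replaced).toNat →
      pvALoop text needle replacement hne limit start pieces replaced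
        = (pieces ++ (pvInter replacement.toList (pvSplit needle.toList budget (text.toList.drop start))).map String.ofList,
           replaced + ((pvSplit needle.toList budget (text.toList.drop start)).length : Int) - 1) := by
  intro budget
  induction budget with
  | zero =>
    intro start pieces replaced hstart hb
    have hstop : replaced ≥ limit := by omega
    rw [pvALoop]
    simp only [hstop, or_true, if_true]
    have hslice : PySem.Str.slice text (some (start : Int)) none
        = String.ofList (text.toList.drop start) := by
      simp [PySem.Str.slice, PySem.Chars.slice_eq_listSlice, PySem.List.slice_from_natCast]
    simp [pvSplit, pvInter, hslice]
  | succ b ih =>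
    intro start pieces replaced hstart hb
    have hlt : replaced < limit := by omega
    rw [pvALoop]
    have hff := PySem.Chars.findFrom_natCast text.toList needle.toList start hstart
    by_cases hidx : PySem.Str.findFrom text needle (start : Int) = -1
    · -- no further occurrence
      have hfind : PySem.Chars.find (text.toList.drop start) needle.toList = -1 := by
        rw [PySem.Str.findFrom_eq] at hidx
        rw [hff] at hidx
        by_contra hc; simp [hc] at hidx
        have := PySem.Chars.neg_one_le_find (text.toList.drop start) needle.toList
        omega
      simp only [hidx, true_or, if_true]
      have hslice : PySem.Str.slice text (some (start : Int)) none
          = String.ofList (text.toList.drop start) := by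
        simp [PySem.Str.slice, PySem.Chars.slice_eq_listSlice, PySem.List.slice_from_natCast]
      simp [pvSplit, hfind, pvInter, hslice]
    · -- replace one occurrence and continue
      have hff' : PySem.Chars.findFrom text.toList needle.toList (start : Int) ≠ -1 := by
        simpa [PySem.Str.findFrom_eq] using hidx
      obtain ⟨_, hk1, hk2⟩ := pvFindFrom_bounds text.toList needle.toList start hff'
      have hfind : PySem.Chars.find (text.toList.drop start) needle.toList ≠ -1 := by
        intro hc; exact hff' (by rw [hff, hc]; simp)
      have hge : 0 ≤ PySem.Chars.find (text.toList.drop start) needle.toList := by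
        have := PySem.Chars.neg_one_le_find (text.toList.drop start) needle.toList; omega
      set i : Nat := (PySem.Chars.find (text.toList.drop start) needle.toList).toNat with hi
      have hidxval : PySem.Str.findFrom text needle (start : Int) = (start : Int) + i := by
        rw [PySem.Str.findFrom_eq, hff, if_neg hfind]; omega
      simp only [hidx, hlt.not_ge, or_self, if_false]
      have hstart' : (PySem.Str.findFrom text needle (start : Int)).toNat + needle.toList.length
          = start + i + needle.toList.length := by rw [hidxval]; omega
      have hle' : start + i + needle.toList.length ≤ text.toList.length := by
        rw [PySem.Str.findFrom_eq] at hidxval; rw [hidxval] at hk2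
        have : ((start : Int) + i).toNat = start + i := by omega
        omega
      rw [hstart', ih (start + i + needle.toList.length) _ (replaced + 1) hle' (by omega)]
      have hdrop : text.toList.drop (start + i + needle.toList.length)
          = (text.toList.drop start).drop (i + needle.toList.length) := by
        rw [List.drop_drop]; ring_nf
      have hslice : PySem.Str.slice text (some (start : Int)) (some (PySem.Str.findFrom text needle (start : Int)))
          = String.ofList ((text.toList.drop start).take i) := by
        rw [PySem.Str.slice, PySem.Chars.slice_eq_listSlice, hidxval,
          show (start : Int) + (i : Int) = ((start + i : Nat) : Int) by push_cast; ring,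
          PySem.List.slice_natCast]
        congr 1
        rw [Nat.add_sub_cancel_left]
      rcases hps : pvSplit needle.toList b ((text.toList.drop start).drop (i + needle.toList.length)) with _ | ⟨p, t⟩
      · exact absurd hps (pvSplit_ne_nil _ _ _)
      · rw [hdrop, hps]
        simp only [pvSplit, hfind, if_false, ← hi, hps]
        rw [PySem.Str.findFrom_eq] at hslice
        simp [pvInter, hslice]
        omega

-- main bridge: for needle ≠ "" and limit ≥ 1 both programs compute join/split of the same pieces
theorem pvMain (text needle replacement : String) (hne : needle ≠ "") (limit : Int) (hl : 1 ≤ limit) :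
    (let r := pvALoop text needle replacement hne limit 0 [] 0
     ((PySem.Str.join "" r.1, r.2) : String × Int))
      = match PySem.Str.splitMax? text needle limit with
        | none => (text, 0)
        | some parts => (PySem.Str.join replacement parts, (parts.length : Int) - 1) := by
  have hnl : needle.toList ≠ [] := by
    intro hcon; exact hne (by simpa [String.toList_eq_nil_iff] using hcon)
  have hsplit : PySem.Str.splitMax? text needle limit
      = some ((pvSplit needle.toList limit.toNat text.toList).map String.ofList) := by
    rw [PySem.Str.splitMax?]
    have : PySem.Chars.splitMax? text.toList needle.toList limit
        = some (pvSplit needle.toList limit.toNat text.toList) := by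
      rw [PySem.Chars.splitMax?]
      have hnot : ¬ (limit < 0) := by omega
      rw [if_neg (by simpa using hnl)]
      rw [PySem.Chars.splitOnMax, if_neg hnot,
        pvGoSpec needle.toList hnl (text.toList.length + 1) text.toList limit.toNat [] [] (by omega)]
      rcases hps : pvSplit needle.toList limit.toNat text.toList with _ | ⟨p, t⟩
      · exact absurd hps (pvSplit_ne_nil _ _ _)
      · simp [pvHd]
    rw [this]; rfl
  rw [hsplit]
  rw [pvALoop_spec text needle replacement hne limit limit.toNat 0 [] 0 (by simp) (by omega)]
  simp only [List.drop_zero, List.nil_append, Prod.mk.injEq]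
  constructor
  · -- strings equal
    rw [PySem.Str.join, PySem.Str.join]
    congr 1
    have hmap : ∀ (xs : List (List Char)), (xs.map String.ofList).map String.toList = xs := by
      intro xs; simp [List.map_map, Function.comp_def, String.toList_ofList]
    rw [hmap, hmap]
    simpa [show ("" : String).toList = [] from rfl] using
      pvJoinInter replacement.toList (pvSplit needle.toList limit.toNat text.toList)
  · -- counts equal
    simp

-- ===== VERDICT (by name: the statement is the Claim_ definition above) =====
theorem safe_literal_replace_py_spec : Claim_equal_safe_literal_replace_py := by
  intro text needle replacement max_replacements _
  unfold Spec_safe_literal_replace_py safe_literal_replace_py safe_literal_replace_py_alt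
  by_cases h : needle = ""
  · simp [h]
  · simp only [h, if_false, dif_neg h]
    have hl : 1 ≤ (if max_replacements > 0 then max_replacements else 1) := by
      split <;> omega
    exact pvMain text needle replacement h _ hl
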